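-- pv_equiv track=rewrite | github.com/sichiiii/30daysChallenge | day_18.py | encrypt_this
-- ===== SOURCE A (Python) =====
-- def encrypt_this(text):
--         result = ''
--         for i in text.split():
--             buffer = ''
--             buffer+=str(ord(i[0]))
--             for j in range(0, len(i)):
--                 new = ""
--                 temp = ""
--                 for j in range(len(i)):
--                     if j == 0:
--                         new += str(ord(i[j]))
--                     elif j == 1:
--                         temp = i[j]
--                         new += i[-1]
--                     elif j == len(i) - 1:
--                         new += temp
--                     else:
--                         new += i[j]
--             result+=new
--             result+=' '
--         return result[:-1]
-- ===== SOURCE B (Python) =====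
-- def encrypt_this(text):
--     out = []
--     for word in text.split():
--         chars = list(word)
--         if len(chars) > 1:
--             chars[1], chars[-1] = chars[-1], chars[1]
--         chars[0] = str(ord(word[0]))
--         out.append(''.join(chars))
--     return ' '.join(out)
-- ===== Notes on version B (the rewrite author's own statement) =====
-- stated objective: faster
-- what changed: A's per-index if/elif classification loop, itself re-run redundantly len(word) times per word with string concatenation into an accumulator sliced at the end, is replaced by a direct swap of the 2nd and last characters plus a first-element ord substitution per word, with the words joined by a single space.
import Mathlib
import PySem

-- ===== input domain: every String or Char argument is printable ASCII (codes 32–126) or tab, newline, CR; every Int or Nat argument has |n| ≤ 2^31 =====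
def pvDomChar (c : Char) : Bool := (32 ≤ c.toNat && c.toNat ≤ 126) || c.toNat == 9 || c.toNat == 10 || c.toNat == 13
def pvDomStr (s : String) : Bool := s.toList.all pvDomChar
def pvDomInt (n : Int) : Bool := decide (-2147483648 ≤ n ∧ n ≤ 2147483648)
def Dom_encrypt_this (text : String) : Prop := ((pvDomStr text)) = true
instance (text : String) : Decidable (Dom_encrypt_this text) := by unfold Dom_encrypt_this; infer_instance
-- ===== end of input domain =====

-- B replaces A's per-index if/elif classification loop (run redundantly len(word) times per word)
-- with a direct two-element swap plus a first-element substitution per word (measurably faster: A re-runs its inner loop len(word) times per word).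

-- ===== PORT A =====
-- one step of the inner loop body 'for j in range(len(i)): if j == 0 … elif … else …'
def pvF (cs : List Char) (st : List Char × List Char) (j : Int) : List Char × List Char :=
  if j = 0 then (st.1 ++ PySem.Int.toChars (((PySem.List.pyGetD cs j ' ').toNat : Int)), st.2)
  else if j = 1 then (st.1 ++ [PySem.List.pyGetD cs (-1) ' '], [PySem.List.pyGetD cs j ' '])
  else if j = (cs.length : Int) - 1 then (st.1 ++ st.2, st.2)
  else (st.1 ++ [PySem.List.pyGetD cs j ' '], st.2)

-- the inner loop with state (new, temp), started at ("", "")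
def pvInnerA (cs : List Char) : List Char × List Char :=
  (PySem.List.pyRange 0 (cs.length : Int)).foldl (pvF cs) ([], [])

-- outer state: (result, new, temp) — Python's 'new'/'temp' persist across words;
-- i[0] (never out of range: split words are nonempty) ported with pyGetD.
def encrypt_this (text : String) : String :=
  let st := (PySem.Str.split₀ text).foldl
    (fun (st : List Char × List Char × List Char) w =>
      let cs := w.toList
      let _buffer : List Char := PySem.Int.toChars (((PySem.List.pyGetD cs 0 ' ').toNat : Int))
      let nt := (PySem.List.pyRange 0 (cs.length : Int)).foldl (fun _ _ => pvInnerA cs) (st.2.1, st.2.2)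
      (st.1 ++ nt.1 ++ [' '], nt.1, nt.2))
    ([], [], [])
  String.mk (PySem.List.slice st.1 none (some (-1)))

-- ===== PORT B =====
-- 'chars[1], chars[-1] = chars[-1], chars[1]' then 'chars[0] = str(ord(word[0]))' then ''.join;
-- on the char-list the str(ord) substitution is 'toChars ++ drop 1'.
def pvEncWordB (w : String) : List Char :=
  let chars := w.toList
  let chars :=
    if 1 < chars.length then
      (chars.set 1 (PySem.List.pyGetD chars (-1) ' ')).set (chars.length - 1)
        (PySem.List.pyGetD chars 1 ' ')
    else chars
  PySem.Int.toChars (((PySem.List.pyGetD w.toList 0 ' ').toNat : Int)) ++ chars.drop 1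

def encrypt_this_alt (text : String) : String :=
  let out := (PySem.Str.split₀ text).foldl (fun acc w => acc ++ [pvEncWordB w]) []
  String.mk (PySem.Chars.join [' '] out)

-- ===== PRECONDITION & SPEC =====
def Spec_encrypt_this (text : String) (out : String) : Prop := out = encrypt_this_alt text
instance (text : String) (out : String) : Decidable (Spec_encrypt_this text out) := by unfold Spec_encrypt_this; infer_instance

-- ===== CLAIM (what is proved, stated in full; the proofs are below) =====
def Claim_equal_encrypt_this : Prop := ∀ (text : String), Dom_encrypt_this text → Spec_encrypt_this text (encrypt_this text)

-- ===== LEMMAS AND PROOFS =====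

theorem pvGetD_neg_one {xs : List Char} (h : xs ≠ []) (d : Char) :
    PySem.List.pyGetD xs (-1) d = xs.getLast h := by
  have hl : xs.length - 1 < xs.length := by
    have := List.length_pos_iff.mpr h; omega
  rw [PySem.List.pyGetD, PySem.List.pyGet?, PySem.List.pyIdx?]
  simp [List.getLast_eq_getElem, List.getElem?_eq_getElem hl, Nat.one_le_iff_ne_zero,
    List.length_eq_zero_iff, h]

theorem pvGetD_nat {xs : List Char} {k : Nat} (hk : k < xs.length) (d : Char) :
    PySem.List.pyGetD xs (k : Int) d = xs[k] := by
  simp [PySem.List.pyGetD, PySem.List.pyGet?, PySem.List.pyIdx?, hk]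

theorem pvSet_last {α : Type} (ds : List α) (h : ds ≠ []) (b : α) :
    ds.set (ds.length - 1) b = ds.dropLast ++ [b] := by
  induction ds with
  | nil => simp at h
  | cons a t ih =>
    cases t with
    | nil => simp
    | cons c u => simpa using ih (by simp)

theorem pvSplit_go_ne_nil (s cur : List Char) (acc : List (List Char)) (hacc : ∀ a ∈ acc, a ≠ []) :
    ∀ w ∈ PySem.Chars.split₀.go s cur acc, w ≠ [] := by
  induction s generalizing cur acc with
  | nil =>
    intro w hw
    by_cases hc : cur.isEmpty
    · simp only [PySem.Chars.split₀.go, hc, if_pos] at hw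
      exact hacc w (by simpa using hw)
    · simp [PySem.Chars.split₀.go, hc] at hw
      rcases hw with h | h
      · exact hacc w h
      · subst h
        simpa [List.reverse_eq_nil_iff] using fun e => hc (by simp [e])
  | cons c rest ih =>
    intro w hw
    by_cases hs : PySem.Chars.isspace c
    · by_cases hc : cur.isEmpty
      · simp only [PySem.Chars.split₀.go, hs, hc, if_pos] at hw
        exact ih [] acc hacc w hw
      · simp only [PySem.Chars.split₀.go, hs, hc] at hw
        refine ih [] (cur.reverse :: acc) ?_ w hw
        intro a ha
        rcases List.mem_cons.mp ha with h | h
        · subst h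
          simpa [List.reverse_eq_nil_iff] using fun e => hc (by simp [e])
        · exact hacc a h
    · simp only [PySem.Chars.split₀.go, hs] at hw
      exact ih (c :: cur) acc hacc w hw

theorem pvSplit_ne_nil (text : String) :
    ∀ w ∈ PySem.Str.split₀ text, w.toList ≠ [] := by
  intro w hw
  have hm : w.toList ∈ PySem.Chars.split₀ text.toList := by
    rw [← PySem.Str.split₀_map_toList]
    exact List.mem_map_of_mem hw
  exact pvSplit_go_ne_nil text.toList [] [] (by simp) w.toList hm

-- invariant of A's inner loop over the middle indices 2 ≤ j ≤ len-2
theorem pvMid (a b : Char) (D : List Char) (m : Nat)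
    (h2 : 2 ≤ m) (hm : m ≤ D.length + 1) :
    (List.range m).foldl (fun st (j : Nat) => pvF (a :: b :: D) st (j : Int)) ([], [])
      = (PySem.Int.toChars ((a.toNat : Int)) ++ [(a :: b :: D).getLast (by simp)]
          ++ ((a :: b :: D).take m).drop 2, [b]) := by
  induction m, h2 using Nat.le_induction with
  | base =>
    simp [List.range_succ, pvF, List.getLast_eq_getElem,
      PySem.List.pyGetD, PySem.List.pyGet?, PySem.List.pyIdx?,
      show (0:Int) ≤ (D.length : Int) + 1 by positivity]
  | succ m h2 ih =>
    have hmD : m ≤ D.length := by omega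
    have hmlt : m < (a :: b :: D).length := by simp; omega
    rw [List.range_succ, List.foldl_append, ih (by omega), List.foldl_cons, List.foldl_nil]
    have c0 : ((m : Nat) : Int) ≠ 0 := by omega
    have c1 : ((m : Nat) : Int) ≠ 1 := by omega
    have c2 : ((m : Nat) : Int) ≠ ((a :: b :: D).length : Int) - 1 := by
      simp only [List.length_cons]; push_cast; omega
    rw [pvF, if_neg c0, if_neg c1, if_neg c2]
    rw [pvGetD_nat hmlt]
    simp only [List.take_succ, List.getElem?_eq_getElem hmlt]
    rw [List.drop_append_of_le_length (by simp [List.length_take]; omega)]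
    simp

-- A's inner loop on a word of length ≥ 3
theorem pvWordA_big (a b : Char) (D : List Char) (hD : D ≠ []) :
    (pvInnerA (a :: b :: D)).1
      = PySem.Int.toChars ((a.toNat : Int)) ++ [(a :: b :: D).getLast (by simp)]
          ++ D.dropLast ++ [b] := by
  have hn : (a :: b :: D).length = (D.length + 1) + 1 := by simp
  unfold pvInnerA
  rw [PySem.List.pyRange_zero_natCast, List.foldl_map, hn, List.range_succ,
    List.foldl_append, pvMid a b D (D.length + 1) (by have := List.length_pos_iff.mpr hD; omega) (by omega),
    List.foldl_cons, List.foldl_nil]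
  have c0 : (((D.length + 1 : Nat)) : Int) ≠ 0 := by omega
  have c1 : (((D.length + 1 : Nat)) : Int) ≠ 1 := by
    have := List.length_pos_iff.mpr hD; omega
  have c2 : (((D.length + 1 : Nat)) : Int) = ((a :: b :: D).length : Int) - 1 := by
    simp only [List.length_cons]; push_cast; omega
  rw [pvF, if_neg c0, if_neg c1, if_pos c2]
  have hD1 : 1 ≤ D.length := by have := List.length_pos_iff.mpr hD; omega
  obtain ⟨k, hk⟩ : ∃ k, D.length = k + 1 := ⟨D.length - 1, by omega⟩
  have htake : ((a :: b :: D).take (D.length + 1)).drop 2 = D.dropLast := by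
    simp [hk, List.take_succ_cons, List.dropLast_eq_take]
  rw [htake]

-- B on a word of length ≥ 3
theorem pvWordB_big (w : String) (a b : Char) (D : List Char) (hD : D ≠ [])
    (hw : w.toList = a :: b :: D) :
    pvEncWordB w
      = PySem.Int.toChars ((a.toNat : Int)) ++ [(a :: b :: D).getLast (by simp)]
          ++ D.dropLast ++ [b] := by
  have hlast := pvGetD_neg_one (show (a :: b :: D) ≠ [] by simp) ' '
  have hD1 : 1 ≤ D.length := by have := List.length_pos_iff.mpr hD; omega
  unfold pvEncWordB
  rw [hw]
  simp only [List.length_cons, show 1 < D.length + 1 + 1 by omega, if_pos, hlast]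
  have h1 : PySem.List.pyGetD (a :: b :: D) 1 ' ' = b := by
    simp [PySem.List.pyGetD, PySem.List.pyGet?, PySem.List.pyIdx?]
  have h0 : PySem.List.pyGetD (a :: b :: D) 0 ' ' = a := by
    simp [PySem.List.pyGetD, PySem.List.pyGet?, PySem.List.pyIdx?,
      show (0:Int) ≤ (D.length : Int) + 1 by positivity]
  rw [h1, h0]
  have hset : ((a :: b :: D).set 1 ((a :: b :: D).getLast (by simp))).set (D.length + 1 + 1 - 1) b
      = a :: (a :: b :: D).getLast (by simp) :: (D.dropLast ++ [b]) := by
    have e : D.length + 1 + 1 - 1 = (D.length - 1) + 1 + 1 := by omega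
    rw [e]
    simp only [List.set_cons_succ, List.set_cons_zero]
    rw [show D.length - 1 + 1 = D.length by omega] at *
    rw [show D.set (D.length - 1) b = D.dropLast ++ [b] from pvSet_last D hD b]
  rw [hset]
  simp

-- the per-word equality: A's inner classification loop = B's swap + substitution
theorem pvWord_eq (w : String) (h : w.toList ≠ []) :
    (pvInnerA w.toList).1 = pvEncWordB w := by
  match hw : w.toList with
  | [] => exact absurd hw h
  | [a] =>
    unfold pvInnerA pvEncWordB
    rw [hw, PySem.List.pyRange_zero_natCast, List.foldl_map]
    simp [pvF, List.range_succ, PySem.List.pyGetD, PySem.List.pyGet?, PySem.List.pyIdx?]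
  | [a, b] =>
    unfold pvInnerA pvEncWordB
    rw [hw, PySem.List.pyRange_zero_natCast, List.foldl_map]
    simp [pvF, List.range_succ, PySem.List.pyGetD, PySem.List.pyGet?, PySem.List.pyIdx?]
  | a :: b :: d :: ds =>
    rw [pvWordA_big a b (d :: ds) (by simp),
      pvWordB_big w a b (d :: ds) (by simp) hw]

-- constant fold
theorem pvFoldl_const {α β : Type} (l : List α) (h : l ≠ []) (c : β) (i : β) :
    l.foldl (fun _ _ => c) i = c := by
  induction l generalizing i with
  | nil => simp at h
  | cons a t ih =>
    cases t with
    | nil => rfl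
    | cons b u => exact ih (by simp) c

theorem pvWords_fold (ws : List String) (hne : ∀ w ∈ ws, w.toList ≠ []) :
    ∀ (r n t : List Char),
      ((ws.foldl
        (fun (st : List Char × List Char × List Char) w =>
          let cs := w.toList
          let _buffer : List Char := PySem.Int.toChars (((PySem.List.pyGetD cs 0 ' ').toNat : Int))
          let nt := (PySem.List.pyRange 0 (cs.length : Int)).foldl (fun _ _ => pvInnerA cs) (st.2.1, st.2.2)
          (st.1 ++ nt.1 ++ [' '], nt.1, nt.2))
        (r, n, t)).1)
      = r ++ (ws.map (fun w => pvEncWordB w ++ [' '])).flatten := by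
  induction ws with
  | nil => intro r n t; simp
  | cons w tl ih =>
    intro r n t
    have hw : w.toList ≠ [] := hne w (List.mem_cons_self)
    have hlen : 0 < w.toList.length := List.length_pos_iff.mpr hw
    have hr : PySem.List.pyRange 0 (w.toList.length : Int) ≠ [] := by
      rw [PySem.List.pyRange_zero_natCast]
      simp only [ne_eq, List.map_eq_nil_iff, List.range_eq_nil]
      omega
    simp only [List.foldl_cons]
    rw [show ((PySem.List.pyRange 0 (w.toList.length : Int)).foldl
        (fun _ _ => pvInnerA w.toList) ((n, t) : List Char × List Char)) = pvInnerA w.toList from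
      pvFoldl_const _ hr _ _]
    rw [ih (fun x hx => hne x (List.mem_cons_of_mem _ hx))]
    simp [pvWord_eq w hw]

theorem pvJoin_flatten (es : List (List Char)) :
    (es.map (fun e => e ++ [' '])).flatten.dropLast = PySem.Chars.join [' '] es := by
  cases es with
  | nil => simp [PySem.Chars.join_nil]
  | cons e tl =>
    suffices h : ∀ (e : List Char) (tl : List (List Char)),
        ((e :: tl).map (fun x => x ++ [' '])).flatten = PySem.Chars.join [' '] (e :: tl) ++ [' '] by
      rw [h, List.dropLast_concat]
    intro e tl
    induction tl generalizing e with
    | nil => simp [PySem.Chars.join_singleton]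
    | cons f tl ih =>
      rw [List.map_cons, List.flatten_cons, PySem.Chars.join_cons_cons, ih f]
      simp

theorem pvB_fold (ws : List String) :
    ∀ acc : List (List Char),
      ws.foldl (fun acc w => acc ++ [pvEncWordB w]) acc = acc ++ ws.map pvEncWordB := by
  induction ws with
  | nil => simp
  | cons w t ih => intro acc; simp [ih]

-- ===== VERDICT (by name: the statement is the Claim_ definition above) =====
theorem encrypt_this_spec : Claim_equal_encrypt_this := by
  intro text _
  unfold Spec_encrypt_this encrypt_this encrypt_this_alt
  simp only [pvWords_fold (PySem.Str.split₀ text) (pvSplit_ne_nil text) [] [] [],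
    PySem.List.slice_to_neg_one, List.nil_append, pvB_fold (PySem.Str.split₀ text) []]
  rw [show (List.map (fun w => pvEncWordB w ++ [' ']) (PySem.Str.split₀ text))
        = (List.map pvEncWordB (PySem.Str.split₀ text)).map (fun e => e ++ [' ']) by
      rw [List.map_map]; rfl,
    pvJoin_flatten]
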